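-- pv_equiv track=rewrite | github.com/SDP-1/Interactive-Device-Platforms-for-Museums-IDPM | Basii Full Component/Atifact_Comparison_Component/artifact_model.py | _find_common_themes
-- ===== SOURCE A (Python) =====
-- from typing import List, Dict, Tuple, Optional
--
-- def _find_common_themes(sym1: str, sym2: str) -> List[str]:
--     """Find common symbolic themes"""
--     themes = {
--         'power': ['power', 'authority', 'strength', 'dominance'],
--         'spirituality': ['spiritual', 'divine', 'sacred', 'holy', 'religious'],
--         'protection': ['protection', 'guard', 'ward', 'shield', 'amulet'],
--         'prosperity': ['prosperity', 'wealth', 'fortune', 'abundance'],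
--         'wisdom': ['wisdom', 'knowledge', 'enlightenment', 'learning']
--     }
--
--     sym1_lower = sym1.lower()
--     sym2_lower = sym2.lower()
--
--     common = []
--     for theme, keywords in themes.items():
--         if any(k in sym1_lower for k in keywords) and any(k in sym2_lower for k in keywords):
--             common.append(theme)
--
--     return common
-- ===== SOURCE B (Python) =====
-- from typing import List, Dict, Tuple, Optional
--
-- def _find_common_themes(sym1: str, sym2: str) -> List[str]:
--     """Find common symbolic themes (two independent detection passes + intersection merge)"""
--     themes = {
--         'power': ['power', 'authority', 'strength', 'dominance'],
--         'spirituality': ['spiritual', 'divine', 'sacred', 'holy', 'religious'],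
--         'protection': ['protection', 'guard', 'ward', 'shield', 'amulet'],
--         'prosperity': ['prosperity', 'wealth', 'fortune', 'abundance'],
--         'wisdom': ['wisdom', 'knowledge', 'enlightenment', 'learning']
--     }
--     s1 = sym1.lower()
--     s2 = sym2.lower()
--     themes1 = [t for t, kws in themes.items() if any(k in s1 for k in kws)]
--     themes2 = [t for t, kws in themes.items() if any(k in s2 for k in kws)]
--     return [t for t in themes if t in themes1 and t in themes2]
-- ===== Notes on version B (the rewrite author's own statement) =====
-- stated objective: alternative
-- what changed: Replaces A's single combined-condition scan with two independent per-string detection passes (themes matched in sym1, themes matched in sym2) and a final declaration-order intersection merge over the theme keys.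
import Mathlib
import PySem

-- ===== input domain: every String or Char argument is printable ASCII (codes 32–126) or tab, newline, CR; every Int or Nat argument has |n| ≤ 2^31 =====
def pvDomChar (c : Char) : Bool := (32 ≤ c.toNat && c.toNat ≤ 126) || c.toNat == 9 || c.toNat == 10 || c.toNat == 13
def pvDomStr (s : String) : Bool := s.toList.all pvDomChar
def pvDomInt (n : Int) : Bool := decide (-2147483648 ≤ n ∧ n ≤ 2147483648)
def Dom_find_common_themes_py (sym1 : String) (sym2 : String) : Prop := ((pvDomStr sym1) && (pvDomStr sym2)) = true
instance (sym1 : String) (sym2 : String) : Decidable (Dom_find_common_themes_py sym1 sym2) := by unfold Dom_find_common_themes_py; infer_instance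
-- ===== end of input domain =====

-- B replaces A's single combined-condition scan with two independent per-string detection
-- passes plus an order-preserving intersection merge (objective: alternative decomposition).


-- the themes dict literal (same in A and B), as an association list in declaration order
def pvThemes : List (String × List String) :=
  [("power", ["power", "authority", "strength", "dominance"]),
   ("spirituality", ["spiritual", "divine", "sacred", "holy", "religious"]),
   ("protection", ["protection", "guard", "ward", "shield", "amulet"]),
   ("prosperity", ["prosperity", "wealth", "fortune", "abundance"]),
   ("wisdom", ["wisdom", "knowledge", "enlightenment", "learning"])]

-- ===== PORT A =====
-- single loop over the dict; each theme appended when BOTH any()-checks succeed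
def find_common_themes_py (sym1 : String) (sym2 : String) : List String :=
  let sym1_lower := PySem.Str.lower sym1
  let sym2_lower := PySem.Str.lower sym2
  pvThemes.foldl (fun common tk =>
    if (tk.2.any fun k => PySem.Str.isIn k sym1_lower) &&
       (tk.2.any fun k => PySem.Str.isIn k sym2_lower)
    then common ++ [tk.1] else common) []

-- ===== PORT B =====
-- two independent detection passes, then an intersection merge over the theme keys
def find_common_themes_py_alt (sym1 : String) (sym2 : String) : List String :=
  let s1 := PySem.Str.lower sym1
  let s2 := PySem.Str.lower sym2
  let themes1 := (pvThemes.filter fun tk => tk.2.any fun k => PySem.Str.isIn k s1).map Prod.fst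
  let themes2 := (pvThemes.filter fun tk => tk.2.any fun k => PySem.Str.isIn k s2).map Prod.fst
  (pvThemes.map Prod.fst).filter fun t => themes1.contains t && themes2.contains t

-- ===== PRECONDITION & SPEC =====
def Spec_find_common_themes_py (sym1 : String) (sym2 : String) (out : List String) : Prop := out = find_common_themes_py_alt sym1 sym2
instance (sym1 : String) (sym2 : String) (out : List String) : Decidable (Spec_find_common_themes_py sym1 sym2 out) := by unfold Spec_find_common_themes_py; infer_instance

-- ===== CLAIM (what is proved, stated in full; the proofs are below) =====
def Claim_equal_find_common_themes_py : Prop := ∀ (sym1 : String) (sym2 : String), Dom_find_common_themes_py sym1 sym2 → Spec_find_common_themes_py sym1 sym2 (find_common_themes_py sym1 sym2)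

-- ===== LEMMAS AND PROOFS =====

-- A's append-if fold is the keys of the conjunction-filtered list
theorem pvFoldl_append_if_eq (ts : List (String × List String))
    (r : String × List String → Bool) (acc : List String) :
    ts.foldl (fun common tk => if r tk then common ++ [tk.1] else common) acc
      = acc ++ (ts.filter r).map Prod.fst := by
  induction ts generalizing acc with
  | nil => simp
  | cons x xs ih =>
    by_cases h : r x = true <;> simp [List.foldl_cons, h, ih]

-- membership of a key in a filtered pass's key list decides the pass's predicate,
-- because the theme keys are distinct
theorem pvContains_filter_keys (ts : List (String × List String))
    (hnd : (ts.map Prod.fst).Nodup) (p : String × List String → Bool)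
    (x : String × List String) (hx : x ∈ ts) :
    ((ts.filter p).map Prod.fst).contains x.1 = p x := by
  by_cases hp : p x = true
  · simp only [hp, List.contains_eq_mem, decide_eq_true_eq, List.mem_map]
    exact ⟨x, List.mem_filter.mpr ⟨hx, hp⟩, rfl⟩
  · simp only [List.contains_eq_mem, List.mem_map, eq_false_of_ne_true hp,
      decide_eq_false_iff_not]
    rintro ⟨y, hy, hkey⟩
    obtain ⟨hyts, hpy⟩ := List.mem_filter.mp hy
    have : y = x := List.inj_on_of_nodup_map hnd hyts hx hkey
    subst this
    exact hp hpy |>.elim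

-- the general shape: B's two passes + merge equal A's single scan, for any
-- predicates, over any theme list with distinct keys
theorem pvMerge_eq (ts : List (String × List String))
    (hnd : (ts.map Prod.fst).Nodup) (p q : String × List String → Bool) :
    (ts.map Prod.fst).filter
        (fun t => ((ts.filter p).map Prod.fst).contains t &&
                  ((ts.filter q).map Prod.fst).contains t)
      = (ts.filter fun x => p x && q x).map Prod.fst := by
  rw [List.filter_map]
  refine congrArg (List.map Prod.fst) (List.filter_congr ?_)
  intro x hx
  simp only [Function.comp_apply,
    pvContains_filter_keys ts hnd p x hx, pvContains_filter_keys ts hnd q x hx]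

-- ===== VERDICT (by name: the statement is the Claim_ definition above) =====
theorem find_common_themes_py_spec : Claim_equal_find_common_themes_py := by
  intro sym1 sym2 _
  unfold Spec_find_common_themes_py find_common_themes_py find_common_themes_py_alt
  rw [pvFoldl_append_if_eq, pvMerge_eq pvThemes (by decide)]
  simp
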